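-- pv_equiv track=rewrite | github.com/gzh23/python_operator | substract_min_operator.py | substract_min_operator
-- ===== SOURCE A (Python) =====
-- def substract_min_operator(sequence):
--     transformed_sequence = []
--
--     # 分段为8个8个的
--     segmented_sequence = [sequence[i:i+8] for i in range(0, len(sequence), 8)]
--
--     for segment in segmented_sequence:
--         min_value = min(segment)
--         transformed_segment = [elem - min_value for elem in segment]
--
--         transformed_sequence.extend(transformed_segment)
--
--     return transformed_sequence
-- ===== SOURCE B (Python) =====
-- def substract_min_operator(sequence):
--     out = []
--     buf = []
--     cur = None
--     for x in sequence:
--         if cur is None or x < cur: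
--             cur = x
--         buf.append(x)
--         if len(buf) == 8:
--             out.extend(v - cur for v in buf)
--             buf = []
--             cur = None
--     if buf:
--         out.extend(v - cur for v in buf)
--     return out
-- ===== Notes on version B (the rewrite author's own statement) =====
-- stated objective: alternative
-- what changed: Replaces A's staged pipeline (build a list of 8-element slices, then per segment compute min and map) with one streaming pass that maintains a buffer and a running minimum, flushing each time the buffer reaches 8 elements and once at the end.
import Mathlib
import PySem

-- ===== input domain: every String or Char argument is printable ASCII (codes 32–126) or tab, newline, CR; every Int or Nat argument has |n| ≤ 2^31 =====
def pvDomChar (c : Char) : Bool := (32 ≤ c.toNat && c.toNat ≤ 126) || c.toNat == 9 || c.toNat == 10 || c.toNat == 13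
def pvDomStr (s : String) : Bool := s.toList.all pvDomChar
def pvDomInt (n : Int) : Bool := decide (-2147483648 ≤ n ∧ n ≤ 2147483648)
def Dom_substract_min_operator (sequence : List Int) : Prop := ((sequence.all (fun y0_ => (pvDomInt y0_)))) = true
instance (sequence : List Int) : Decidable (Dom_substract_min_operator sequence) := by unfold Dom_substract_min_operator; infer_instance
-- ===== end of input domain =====

-- B replaces A's staged pipeline (list of 8-element slices, then per-segment min and map) with a
-- single streaming pass maintaining a buffer and a running minimum, flushed every 8 elements
-- (objective: alternative).

-- ===== PORT A =====
def substract_min_operator (sequence : List Int) : List Int :=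
  let segmented_sequence :=
    (PySem.List.pyRange 0 (PySem.List.len sequence) 8).map
      (fun i => PySem.List.slice sequence (some i) (some (i + 8)))
  segmented_sequence.foldl
    (fun transformed_sequence segment =>
      let min_value := (PySem.List.min? segment (fun y => y)).getD 0
      transformed_sequence ++ segment.map (fun elem => elem - min_value)) []

-- ===== PORT B =====
-- loop body of B: state = (out, buf, cur); running-min update, append to buf, flush at 8
def pvStepB (st : List Int × List Int × Option Int) (x : Int) : List Int × List Int × Option Int :=
  let out := st.1
  let buf := st.2.1
  let cur' : Int := match st.2.2 with
    | none => x
    | some m => if x < m then x else m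
  let buf' := buf ++ [x]
  if buf'.length = 8 then (out ++ buf'.map (fun v => v - cur'), [], none)
  else (out, buf', some cur')

def substract_min_operator_alt (sequence : List Int) : List Int :=
  let st := sequence.foldl pvStepB ([], [], none)
  if st.2.1 = [] then st.1
  else st.1 ++ st.2.1.map (fun v => v - st.2.2.getD 0)

-- ===== PRECONDITION & SPEC =====
def Spec_substract_min_operator (sequence : List Int) (out : List Int) : Prop := out = substract_min_operator_alt sequence
instance (sequence : List Int) (out : List Int) : Decidable (Spec_substract_min_operator sequence out) := by unfold Spec_substract_min_operator; infer_instance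

-- ===== CLAIM (what is proved, stated in full; the proofs are below) =====
def Claim_equal_substract_min_operator : Prop := ∀ (sequence : List Int), Dom_substract_min_operator sequence → Spec_substract_min_operator sequence (substract_min_operator sequence)

-- ===== LEMMAS AND PROOFS =====

-- the list of 8-element chunks of s, as drop/take
def pvChunks (s : List Int) : List (List Int) :=
  (List.range ((s.length + 7) / 8)).map (fun k => (s.drop (8 * k)).take 8)

-- the common reference result: per chunk, subtract its minimum
def pvRef : List Int → List Int
  | [] => []
  | x :: t =>
      (List.take 8 (x :: t)).map
        (fun e => e - ((PySem.List.min? (List.take 8 (x :: t)) (fun y => y)).getD 0))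
      ++ pvRef (List.drop 7 t)
termination_by s => s.length
decreasing_by simp only [List.length_drop, List.length_cons]; omega

lemma pvRef_nil : pvRef [] = [] := by simp [pvRef]

lemma pvRef_cons (x : Int) (t : List Int) :
    pvRef (x :: t) =
      (List.take 8 (x :: t)).map
        (fun e => e - ((PySem.List.min? (List.take 8 (x :: t)) (fun y => y)).getD 0))
      ++ pvRef (List.drop 8 (x :: t)) := by
  rw [pvRef.eq_def]
  rfl

lemma pvChunks_nil : pvChunks [] = [] := by simp [pvChunks]

lemma pvChunks_cons (s : List Int) (h : s ≠ []) :
    pvChunks s = s.take 8 :: pvChunks (s.drop 8) := by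
  have hl : 0 < s.length := List.length_pos_iff.mpr h
  have hk : (s.length + 7) / 8 = ((s.drop 8).length + 7) / 8 + 1 := by
    simp only [List.length_drop]
    rcases Nat.lt_or_ge s.length 9 with h9 | h9
    · interval_cases hs : s.length <;> simp
    · have h2 : s.length + 7 = ((s.length - 8) + 7) + 8 := by omega
      rw [h2, Nat.add_div_right _ (by norm_num)]
  unfold pvChunks
  rw [hk, List.range_succ_eq_map, List.map_cons, List.map_map]
  simp only [Nat.mul_zero, List.drop_zero]
  congr 1
  apply List.map_congr_left
  intro k _
  simp only [Function.comp]
  rw [List.drop_drop, show 8 + 8 * k = 8 * Nat.succ k from by omega]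

-- A's slice at index 8*k is the k-th drop/take chunk
lemma pvSlice_chunk (s : List Int) (k : Nat) :
    PySem.List.slice s (some (0 + 8 * (k : Int))) (some (0 + 8 * (k : Int) + 8)) =
      (s.drop (8 * k)).take 8 := by
  have h1 : (0 + 8 * (k : Int)) = ((8 * k : Nat) : Int) := by push_cast; ring
  have h2 : (0 + 8 * (k : Int) + 8) = ((8 * k : Nat) : Int) + ((8 : Nat) : Int) := by
    push_cast; ring
  rw [h2, h1, PySem.List.slice_natCast_add]

-- A's segment list is pvChunks
lemma pvSegs_eq (s : List Int) :
    (PySem.List.pyRange 0 (PySem.List.len s) 8).map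
      (fun i => PySem.List.slice s (some i) (some (i + 8))) = pvChunks s := by
  rcases s with _ | ⟨x, t⟩
  · simp [PySem.List.pyRange_of_pos (0 : Int) 0 (by norm_num : (0:Int) < 8), pvChunks,
      PySem.List.len]
  · have hlen : PySem.List.len (x :: t) = ((x :: t).length : Int) := by
      simp [PySem.List.len]
    have hpos : (0 : Int) < PySem.List.len (x :: t) := by
      rw [hlen]; exact_mod_cast Nat.succ_pos t.length
    rw [PySem.List.pyRange_of_pos 0 (PySem.List.len (x :: t)) (by norm_num : (0:Int) < 8),
      if_pos hpos, List.map_map]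
    unfold pvChunks
    have hK : ((PySem.List.len (x :: t) - 0 + 8 - 1) / 8).toNat = ((x :: t).length + 7) / 8 := by
      rw [hlen]
      have : ((x :: t).length : Int) - 0 + 8 - 1 = (((x :: t).length + 7 : Nat) : Int) := by
        push_cast; ring
      rw [this]
      rfl
    rw [hK]
    apply List.map_congr_left
    intro k _
    simpa using pvSlice_chunk (x :: t) k

-- A equals the reference
lemma pvA_eq_ref (s : List Int) : substract_min_operator s = pvRef s := by
  unfold substract_min_operator
  simp only []
  rw [pvSegs_eq, PySem.List.foldl_append_eq_flatMap
    (fun segment => segment.map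
      (fun elem => elem - ((PySem.List.min? segment (fun y => y)).getD 0))) (pvChunks s) []]
  simp only [List.nil_append]
  induction hn : s.length using Nat.strong_induction_on generalizing s with
  | _ n ih =>
    rcases s with _ | ⟨x, t⟩
    · simp [pvChunks_nil, pvRef_nil]
    · rw [pvChunks_cons (x :: t) (by simp), List.flatMap_cons, pvRef_cons]
      congr 1
      have hlt : (List.drop 8 (x :: t)).length < n := by
        subst hn; simp only [List.length_drop, List.length_cons]; omega
      exact ih _ hlt _ rfl

-- B's loop filling a nonfull buffer: either completes the chunk (flush) or keeps accumulating
lemma pvFill (c : List Int) (out buf : List Int) (m : Int)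
    (hb : buf.length < 8) (hlen : buf.length + c.length ≤ 8) :
    c.foldl pvStepB (out, buf, some m) =
      if buf.length + c.length = 8 then
        (out ++ (buf ++ c).map (fun v => v - c.foldl min m), [], none)
      else (out, buf ++ c, some (c.foldl min m)) := by
  induction c generalizing out buf m with
  | nil =>
      simp only [List.foldl_nil, List.append_nil, List.length_nil, Nat.add_zero]
      rw [if_neg (by omega)]
  | cons x t ih =>
      rw [List.foldl_cons]
      have hstep : pvStepB (out, buf, some m) x =
          if (buf ++ [x]).length = 8 then
            (out ++ (buf ++ [x]).map (fun v => v - (if x < m then x else m)), [], none)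
          else (out, buf ++ [x], some (if x < m then x else m)) := rfl
      have hmin : (if x < m then x else m) = min m x := by
        rw [min_def]; split_ifs <;> omega
      by_cases h8 : buf.length + 1 = 8
      · -- this element fills the buffer: flush; by hlen the tail is empty
        have ht : t = [] := by
          simp only [List.length_cons] at hlen
          exact List.eq_nil_of_length_eq_zero (by omega)
        subst ht
        have h1 : (buf ++ [x]).length = 8 := by
          simp only [List.length_append, List.length_cons, List.length_nil]; omega
        have h2 : buf.length + [x].length = 8 := by
          simp only [List.length_cons, List.length_nil]; omega
        rw [hstep, if_pos h1, List.foldl_nil, if_pos h2, List.foldl_cons, List.foldl_nil, hmin]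
      · rw [hstep, if_neg (by simp [List.length_append]; omega),
          ih _ (buf ++ [x]) _ (by simp [List.length_append]; omega)
            (by simp only [List.length_append, List.length_cons, List.length_nil] at hlen ⊢; omega)]
        by_cases hcond : buf.length + (x :: t).length = 8
        · rw [if_pos (by simp at hcond ⊢; omega), if_pos hcond]
          simp [hmin]
        · rw [if_neg (by simp at hcond ⊢; omega), if_neg hcond]
          simp [hmin]

-- running B's loop over one chunk (≤ 8 elements) starting from an empty buffer
lemma pvChunkRun (x : Int) (t : List Int) (out : List Int)
    (hlen : (x :: t).length ≤ 8) :
    (x :: t).foldl pvStepB (out, [], none) =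
      if (x :: t).length = 8 then
        (out ++ (x :: t).map
          (fun v => v - ((PySem.List.min? (x :: t) (fun y => y)).getD 0)), [], none)
      else (out, x :: t, some ((PySem.List.min? (x :: t) (fun y => y)).getD 0)) := by
  have hstep : pvStepB (out, [], none) x = (out, [x], some x) := by
    simp [pvStepB]
  rw [List.foldl_cons, hstep,
    pvFill t out [x] x (by simp) (by simp at hlen ⊢; omega),
    PySem.List.min?_id_cons]
  by_cases hcond : (x :: t).length = 8
  · rw [if_pos (by simp at hcond ⊢; omega), if_pos hcond]
    simp
  · rw [if_neg (by simp at hcond ⊢; omega), if_neg hcond]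
    simp

-- B's finalisation step (the trailing 'if buf:' flush)
def pvFinish (st : List Int × List Int × Option Int) : List Int :=
  if st.2.1 = [] then st.1 else st.1 ++ st.2.1.map (fun v => v - st.2.2.getD 0)

-- B's loop from a fresh buffer computes the reference, appended to the output so far
lemma pvB_loop (s : List Int) (out : List Int) :
    pvFinish (s.foldl pvStepB (out, [], none)) = out ++ pvRef s := by
  induction hn : s.length using Nat.strong_induction_on generalizing s out with
  | _ n ih =>
    rcases s with _ | ⟨x, t⟩
    · simp [pvFinish, pvRef_nil]
    · have hsplit : x :: t = (x :: t).take 8 ++ (x :: t).drop 8 :=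
        (List.take_append_drop 8 (x :: t)).symm
      by_cases hbig : 8 ≤ (x :: t).length
      · -- a full chunk, then recurse on the rest
        have htake : (x :: t).take 8 = x :: t.take 7 := by simp
        have htlen : ((x :: t).take 8).length = 8 := by
          simp only [List.length_take]; omega
        conv_lhs => rw [hsplit]
        rw [List.foldl_append, htake,
          pvChunkRun x (t.take 7) out (by rw [← htake]; omega),
          if_pos (by rw [← htake]; exact htlen)]
        have hlt : ((x :: t).drop 8).length < n := by
          subst hn; simp only [List.length_drop, List.length_cons]; omega
        rw [ih _ hlt _ _ rfl, pvRef_cons, htake, List.append_assoc]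
      · -- a final partial chunk: the loop leaves it in the buffer, pvFinish flushes it
        have htake : (x :: t).take 8 = x :: t := List.take_of_length_le (by omega)
        have hdrop : (x :: t).drop 8 = [] := List.drop_eq_nil_of_le (by omega)
        rw [pvChunkRun x t out (by omega), if_neg (by omega)]
        rw [pvRef_cons, htake, hdrop, pvRef_nil, List.append_nil]
        simp [pvFinish]

-- B equals the reference
lemma pvB_eq_ref (s : List Int) : substract_min_operator_alt s = pvRef s := by
  have h := pvB_loop s []
  simpa [substract_min_operator_alt, pvFinish] using h

-- ===== VERDICT (by name: the statement is the Claim_ definition above) =====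
theorem substract_min_operator_spec : Claim_equal_substract_min_operator := by
  intro s _
  unfold Spec_substract_min_operator
  rw [pvA_eq_ref, pvB_eq_ref]
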